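-- pv_equiv track=rewrite | github.com/kiraxkir/chrono | Desktop/chiffrement-main/projet_chiffrement/module/shiftrows.py | decalageInv
-- ===== SOURCE A (Python) =====
-- def decalageInv(message, permut):
--     tmp = [c for c in message]
--     tmp2 = [0, 0, 0, 0]
--     for i in range(permut):
--         for j in range(4):
--             tmp2[j] = tmp[(3+j)%4]
--         tmp = [x for x in tmp2]
--
--     return tmp
-- ===== SOURCE B (Python) =====
-- def decalageInv(message, permut):
--     if permut <= 0:
--         return list(message)
--     k = permut % 4
--     return [message[(j - k) % 4] for j in range(4)]
-- ===== Notes on version B (the rewrite author's own statement) =====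
-- stated objective: faster
-- what changed: Replaces A's permut-iteration loop (each pass recopying a rotated 4-slot buffer) with a single modular-index rotation by permut % 4, O(1) instead of O(permut).
import Mathlib
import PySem

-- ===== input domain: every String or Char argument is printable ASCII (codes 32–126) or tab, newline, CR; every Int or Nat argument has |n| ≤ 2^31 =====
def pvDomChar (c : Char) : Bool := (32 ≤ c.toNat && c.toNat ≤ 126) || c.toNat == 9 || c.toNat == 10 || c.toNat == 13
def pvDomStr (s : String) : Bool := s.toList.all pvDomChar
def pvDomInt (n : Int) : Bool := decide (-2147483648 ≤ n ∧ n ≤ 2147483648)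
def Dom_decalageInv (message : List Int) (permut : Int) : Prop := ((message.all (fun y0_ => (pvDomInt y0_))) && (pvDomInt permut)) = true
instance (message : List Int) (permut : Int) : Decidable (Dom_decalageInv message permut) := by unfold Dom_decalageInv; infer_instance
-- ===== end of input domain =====

-- B rotates once by permut % 4 via modular indexing instead of looping permut times (O(1) vs O(permut)).

-- ===== PORT A =====
-- for i in range(permut): tmp2[j] = tmp[(3+j)%4] for j in 0..3; tmp = copy of tmp2
-- (3+j)%4 for j = 0,1,2,3 gives indices 3,0,1,2; pyGetD is exact here since Pre_ keeps these in range.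
def decalageInvLoop (tmp : List Int) (n : Nat) : List Int :=
  match n with
  | 0 => tmp
  | n + 1 =>
      decalageInvLoop
        [PySem.List.pyGetD tmp 3 0, PySem.List.pyGetD tmp 0 0,
         PySem.List.pyGetD tmp 1 0, PySem.List.pyGetD tmp 2 0] n

def decalageInv (message : List Int) (permut : Int) : List Int :=
  decalageInvLoop message permut.toNat   -- range(permut) runs max(permut,0) iterations

-- ===== PORT B =====
def decalageInv_alt (message : List Int) (permut : Int) : List Int :=
  if permut ≤ 0 then message
  else
    let k := PySem.Int.mod permut 4
    (PySem.List.pyRange 0 4 1).map (fun j => PySem.List.pyGetD message (PySem.Int.mod (j - k) 4) 0)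

-- ===== PRECONDITION & SPEC =====
-- Pre_ excludes exactly the inputs on which A raises IndexError: permut ≥ 1 with fewer than 4 elements.
def Pre_decalageInv (message : List Int) (permut : Int) : Prop :=
  permut ≤ 0 ∨ 4 ≤ message.length
instance (message : List Int) (permut : Int) : Decidable (Pre_decalageInv message permut) := by
  unfold Pre_decalageInv; infer_instance
def pvWitness_decalageInv : List Int × Int := ([5, -2, 7, 11], 3)

def Spec_decalageInv (message : List Int) (permut : Int) (out : List Int) : Prop := out = decalageInv_alt message permut
instance (message : List Int) (permut : Int) (out : List Int) : Decidable (Spec_decalageInv message permut out) := by unfold Spec_decalageInv; infer_instance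

-- ===== CLAIM (what is proved, stated in full; the proofs are below) =====
def Claim_equal_decalageInv : Prop := ∀ (message : List Int) (permut : Int), Dom_decalageInv message permut → Pre_decalageInv message permut → Spec_decalageInv message permut (decalageInv message permut)

-- ===== LEMMAS AND PROOFS =====

-- A's loop on a 4-element list is the n-th right rotation, characterised by n % 4.
theorem decalageInvLoop_rot4 (n : Nat) : ∀ (a b c d : Int),
    decalageInvLoop [a, b, c, d] n =
      if n % 4 = 0 then [a, b, c, d]
      else if n % 4 = 1 then [d, a, b, c]
      else if n % 4 = 2 then [c, d, a, b]
      else [b, c, d, a] := by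
  induction n with
  | zero => intro a b c d; simp [decalageInvLoop]
  | succ n ih =>
      intro a b c d
      have step : decalageInvLoop [a, b, c, d] (n + 1) = decalageInvLoop [d, a, b, c] n := by
        simp [decalageInvLoop, PySem.List.pyGetD]
      rw [step, ih d a b c]
      have h4 : n % 4 = 0 ∨ n % 4 = 1 ∨ n % 4 = 2 ∨ n % 4 = 3 := by omega
      rcases h4 with h | h | h | h <;> (
        have h' : (n + 1) % 4 = (n % 4 + 1) % 4 := by omega
        simp [h, h'])

theorem decalageInv_spec_aux (message : List Int) (permut : Int)
    (hpre : Pre_decalageInv message permut) :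
    decalageInv message permut = decalageInv_alt message permut := by
  by_cases hp : permut ≤ 0
  · have hn : permut.toNat = 0 := by omega
    simp [decalageInv, decalageInv_alt, hn, hp, decalageInvLoop]
  · have hlen : 4 ≤ message.length := by
      rcases hpre with h | h
      · exact absurd h hp
      · exact h
    obtain ⟨a, rest₁⟩ : ∃ a t, message = a :: t := by
      cases message with
      | nil => simp at hlen
      | cons a t => exact ⟨a, t, rfl⟩
    obtain ⟨t, rfl⟩ := rest₁
    obtain ⟨b, t, rfl⟩ : ∃ b u, t = b :: u := by
      cases t with
      | nil => simp at hlen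
      | cons b u => exact ⟨b, u, rfl⟩
    obtain ⟨c, t, rfl⟩ : ∃ c u, t = c :: u := by
      cases t with
      | nil => simp at hlen
      | cons c u => exact ⟨c, u, rfl⟩
    obtain ⟨d, t, rfl⟩ : ∃ d u, t = d :: u := by
      cases t with
      | nil => simp at hlen
      | cons d u => exact ⟨d, u, rfl⟩
    -- peel the first iteration of A's loop (indices 3,0,1,2 hit a,b,c,d even with a longer tail)
    have hnpos : 1 ≤ permut.toNat := by omega
    obtain ⟨m, hm⟩ : ∃ m, permut.toNat = m + 1 := ⟨permut.toNat - 1, by omega⟩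
    have first : decalageInv (a :: b :: c :: d :: t) permut = decalageInvLoop [d, a, b, c] m := by
      simp [decalageInv, hm, decalageInvLoop, PySem.List.pyGetD_ofNat']
    rw [first, decalageInvLoop_rot4]
    -- B's side: k = permut % 4 ∈ {0,1,2,3}
    have hk4 : permut % 4 = 0 ∨ permut % 4 = 1 ∨ permut % 4 = 2 ∨ permut % 4 = 3 := by omega
    rcases hk4 with hk | hk | hk | hk
    · have hmn : m % 4 = 3 := by omega
      simp [decalageInv_alt, hp, hk, hmn, PySem.List.pyRange]
      norm_num [List.range_succ, PySem.List.pyGetD_ofNat']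
    · have hmn : m % 4 = 0 := by omega
      simp [decalageInv_alt, hp, hk, hmn, PySem.List.pyRange]
      norm_num [List.range_succ, PySem.List.pyGetD_ofNat']
    · have hmn : m % 4 = 1 := by omega
      simp [decalageInv_alt, hp, hk, hmn, PySem.List.pyRange]
      norm_num [List.range_succ, PySem.List.pyGetD_ofNat']
    · have hmn : m % 4 = 2 := by omega
      simp [decalageInv_alt, hp, hk, hmn, PySem.List.pyRange]
      norm_num [List.range_succ, PySem.List.pyGetD_ofNat']

-- ===== VERDICT (by name: the statement is the Claim_ definition above) =====
theorem decalageInv_spec : Claim_equal_decalageInv := by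
  intro message permut _ hpre
  exact decalageInv_spec_aux message permut hpre
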